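-- pv_equiv track=rewrite | github.com/seymoneg/3675-hwk1 | hwk1.py | halveEvensRecursive
-- ===== SOURCE A (Python) =====
-- def halveEvensRecursive(evenNums):
--     if not evenNums:
--         return []
--     else:
--         idx = evenNums[0]
--         evens = []
--         if idx % 2 == 0:
--             idx //= 2
--             evens.append(idx)
--         result = evens + halveEvensRecursive(evenNums[1:])
--
--     return result
-- ===== SOURCE B (Python) =====
-- def halveEvensRecursive(evenNums):
--     result = []
--     for x in evenNums:
--         if x % 2 == 0:
--             result.append(x // 2)
--     return result
-- ===== Notes on version B (the rewrite author's own statement) =====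
-- stated objective: faster
-- what changed: Replaced the recursive tail decomposition (per-element slice and list concatenation with a recursive call on the rest) by a single explicit in-order loop appending halved evens to one accumulator list.
import Mathlib
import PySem

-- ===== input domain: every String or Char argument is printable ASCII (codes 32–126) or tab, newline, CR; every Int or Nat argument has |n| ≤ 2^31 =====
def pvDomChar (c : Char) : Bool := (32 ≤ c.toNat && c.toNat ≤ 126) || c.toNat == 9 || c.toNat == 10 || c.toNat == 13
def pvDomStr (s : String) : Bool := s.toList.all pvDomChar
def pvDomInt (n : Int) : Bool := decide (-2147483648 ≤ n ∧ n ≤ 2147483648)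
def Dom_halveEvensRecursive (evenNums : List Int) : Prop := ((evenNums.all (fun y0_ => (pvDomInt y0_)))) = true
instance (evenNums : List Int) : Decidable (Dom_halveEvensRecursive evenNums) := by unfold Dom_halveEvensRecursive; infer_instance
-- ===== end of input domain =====

-- B replaces A's recursive decomposition by one explicit accumulating loop (simpler; avoids per-call slicing/concatenation).

-- ===== PORT A =====
def halveEvensRecursive (evenNums : List Int) : List Int :=
  match evenNums with
  | [] => []
  | idx :: rest =>
      let evens : List Int :=
        if PySem.Int.mod idx 2 = 0 then [PySem.Int.floordiv idx 2] else []
      evens ++ halveEvensRecursive rest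

-- ===== PORT B =====
def halveEvensRecursive_alt (evenNums : List Int) : List Int :=
  evenNums.foldl
    (fun result x =>
      if PySem.Int.mod x 2 = 0 then result ++ [PySem.Int.floordiv x 2] else result)
    []

-- ===== PRECONDITION & SPEC =====
def Spec_halveEvensRecursive (evenNums : List Int) (out : List Int) : Prop := out = halveEvensRecursive_alt evenNums
instance (evenNums : List Int) (out : List Int) : Decidable (Spec_halveEvensRecursive evenNums out) := by unfold Spec_halveEvensRecursive; infer_instance

-- ===== CLAIM (what is proved, stated in full; the proofs are below) =====
def Claim_equal_halveEvensRecursive : Prop := ∀ (evenNums : List Int), Dom_halveEvensRecursive evenNums → Spec_halveEvensRecursive evenNums (halveEvensRecursive evenNums)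

-- ===== LEMMAS AND PROOFS =====
theorem halveEvensRecursive_alt_acc (evenNums : List Int) (acc : List Int) :
    evenNums.foldl
      (fun result x =>
        if PySem.Int.mod x 2 = 0 then result ++ [PySem.Int.floordiv x 2] else result)
      acc = acc ++ halveEvensRecursive evenNums := by
  induction evenNums generalizing acc with
  | nil => simp [halveEvensRecursive]
  | cons h t ih =>
      simp only [List.foldl_cons, halveEvensRecursive, ih]
      split <;> simp

-- ===== VERDICT (by name: the statement is the Claim_ definition above) =====
theorem halveEvensRecursive_spec : Claim_equal_halveEvensRecursive := by
  intro evenNums _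
  unfold Spec_halveEvensRecursive halveEvensRecursive_alt
  rw [halveEvensRecursive_alt_acc]
  simp
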